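-- pv_equiv track=rewrite | github.com/anzenaoto/MINI-GAME | Threes.py | fscore
-- ===== SOURCE A (Python) =====
-- def fscore(table):
--     score = 0
--     for i in table:
--         for j in range(4):
--             temp_score = 0
--             if i[j]%3 == 0 and i[j] != 0:
--                 temp_score += 1
--                 TI = i[j]//3
--                 TS = 1
--                 while TI != 1:
--                     TI = TI//2
--                     TS += 1
--                 for k in range(TS):
--                     temp_score = temp_score*3
--             score += temp_score
--     return score
-- ===== SOURCE B (Python) =====
-- def fscore(table):
--     total = 0
--     for row in table:
--         for j in range(4):
--             v = row[j]
--             if v % 3 == 0 and v != 0: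
--                 total += 3 ** (v // 3).bit_length()
--     return total
-- ===== Notes on version B (the rewrite author's own statement) =====
-- stated objective: simpler
-- what changed: B keeps the double loop over rows and the four columns and the divisibility guard, but the entire inner while-loop (counting halvings of v//3 down to 1) plus the repeated-multiply loop is replaced by the closed form 3 ** (v // 3).bit_length(); Pre_ excludes inputs where A raises IndexError (a row shorter than 4) or loops forever (a negative nonzero multiple of 3 among the first four cells, where B would return but A never does).
import Mathlib
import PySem

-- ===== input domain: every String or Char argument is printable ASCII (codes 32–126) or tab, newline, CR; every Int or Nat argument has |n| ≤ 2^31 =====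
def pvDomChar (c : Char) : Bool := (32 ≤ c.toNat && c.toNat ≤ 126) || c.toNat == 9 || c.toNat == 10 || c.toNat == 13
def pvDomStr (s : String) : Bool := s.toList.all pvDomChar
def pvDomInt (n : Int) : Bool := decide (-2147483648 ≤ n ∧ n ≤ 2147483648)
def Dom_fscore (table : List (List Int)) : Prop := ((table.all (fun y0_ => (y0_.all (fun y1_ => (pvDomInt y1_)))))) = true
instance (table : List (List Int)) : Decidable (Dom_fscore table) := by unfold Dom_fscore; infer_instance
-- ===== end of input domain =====

-- B keeps A's double loop over rows and the four columns but replaces the inner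
-- halving while-loop and the repeated-multiply loop by the closed form
-- 3 ** (v // 3).bit_length() (objective: simpler).

-- ===== PORT A =====
-- the 'while TI != 1' loop, fuel-bounded only to make it total in Lean; Pre_ keeps inputs where it terminates
def pvWhileTS : Nat → Int → Int → Int
  | 0, _, ts => ts
  | f + 1, ti, ts => if ti ≠ 1 then pvWhileTS f (PySem.Int.floordiv ti 2) (ts + 1) else ts

def fscore (table : List (List Int)) : Int :=
  table.foldl (fun score i =>
    (PySem.List.pyRange 0 4 1).foldl (fun score j =>
      let tempScore : Int := 0
      let tempScore :=
        if PySem.Int.mod (PySem.List.pyGetD i j 0) 3 = 0 ∧ PySem.List.pyGetD i j 0 ≠ 0 then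
          let tempScore := tempScore + 1
          let ti := PySem.Int.floordiv (PySem.List.pyGetD i j 0) 3
          let ts := pvWhileTS 64 ti 1
          (PySem.List.pyRange 0 ts 1).foldl (fun t _ => t * 3) tempScore
        else tempScore
      score + tempScore) score) 0

-- ===== PORT B =====
def fscore_alt (table : List (List Int)) : Int :=
  table.foldl (fun total row =>
    (PySem.List.pyRange 0 4 1).foldl (fun total j =>
      let v := PySem.List.pyGetD row j 0
      if PySem.Int.mod v 3 = 0 ∧ v ≠ 0 then
        total + 3 ^ PySem.Int.bitLength (PySem.Int.floordiv v 3)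
      else total) total) 0

-- ===== PRECONDITION & SPEC =====
-- Pre_ excludes exactly the inputs on which A does not return: a row shorter than 4 (IndexError)
-- and a negative nonzero multiple of 3 among a row's first four cells (the while-loop never reaches 1).
def Pre_fscore (table : List (List Int)) : Prop :=
  ∀ row ∈ table, 4 ≤ row.length ∧
    ∀ v ∈ row.take 4, PySem.Int.mod v 3 = 0 → v ≠ 0 → 0 < v

instance (table : List (List Int)) : Decidable (Pre_fscore table) := by
  unfold Pre_fscore; infer_instance

def pvWitness_fscore : List (List Int) := [[3, 1, 2, 48], [0, 9, 5, 6]]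

def Spec_fscore (table : List (List Int)) (out : Int) : Prop := out = fscore_alt table
instance (table : List (List Int)) (out : Int) : Decidable (Spec_fscore table out) := by
  unfold Spec_fscore; infer_instance

-- ===== CLAIM (what is proved, stated in full; the proofs are below) =====
def Claim_equal_fscore : Prop :=
  ∀ (table : List (List Int)), Dom_fscore table → Pre_fscore table → Spec_fscore table (fscore table)

-- ===== LEMMAS AND PROOFS =====

-- the while loop computes bit_length (the fuel 64 covers every |v| ≤ 2^31)
lemma pvWhileTS_eq (f : Nat) (ti ts : Int) (h1 : 1 ≤ ti) (h2 : ti < 2 ^ f) :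
    pvWhileTS f ti ts = ts - 1 + PySem.Int.bitLength ti := by
  induction f generalizing ti ts with
  | zero => simp at h2; omega
  | succ f ih =>
    rw [pvWhileTS]
    by_cases h : ti = 1
    · subst h
      have h1b : PySem.Int.bitLength (1 : Int) = 1 := by decide
      simp [h1b]
    · simp only [h, if_pos, ne_eq, not_false_iff]
      have h2' : (2:Int) ≤ ti := by omega
      have hfd : PySem.Int.floordiv ti 2 = ti / 2 :=
        PySem.Int.floordiv_eq_ediv_of_pos (by omega)
      have hb := PySem.Int.bitLength_of_pos (n := ti) (by omega)
      have h1' : 1 ≤ PySem.Int.floordiv ti 2 := by rw [hfd]; omega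
      have h2'' : PySem.Int.floordiv ti 2 < 2 ^ f := by
        rw [hfd]; have : (2:Int) ^ (f+1) = 2 ^ f * 2 := by ring
        omega
      rw [ih _ _ h1' h2'', hb]
      push_cast; ring

lemma foldl_mul3 (l : List Int) (t : Int) :
    l.foldl (fun t _ => t * 3) t = t * 3 ^ l.length := by
  induction l generalizing t with
  | nil => simp
  | cons a l ih => simp [List.foldl, ih, pow_succ]; ring

-- one cell's contribution in A equals B's closed-form term
lemma cell_eq (v : Int) (hdom : -2147483648 ≤ v ∧ v ≤ 2147483648)
    (hpre : PySem.Int.mod v 3 = 0 → v ≠ 0 → 0 < v) :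
    (if PySem.Int.mod v 3 = 0 ∧ v ≠ 0 then
        (PySem.List.pyRange 0 (pvWhileTS 64 (PySem.Int.floordiv v 3) 1) 1).foldl
          (fun t _ => t * 3) ((0 : Int) + 1)
      else (0 : Int)) =
    (if PySem.Int.mod v 3 = 0 ∧ v ≠ 0 then
        (3 : Int) ^ PySem.Int.bitLength (PySem.Int.floordiv v 3)
      else 0) := by
  by_cases hm : PySem.Int.mod v 3 = 0 ∧ v ≠ 0
  · obtain ⟨h3, h0⟩ := hm
    have hv : 0 < v := hpre h3 h0
    have hdvd : (3:Int) ∣ v := (PySem.Int.mod_eq_zero_iff_dvd v 3).mp h3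
    have hfd : PySem.Int.floordiv v 3 = v / 3 :=
      PySem.Int.floordiv_eq_ediv_of_pos (by omega)
    have h1 : 1 ≤ PySem.Int.floordiv v 3 := by
      rw [hfd]
      obtain ⟨k, hk⟩ := hdvd
      omega
    have h2 : PySem.Int.floordiv v 3 < 2 ^ 64 := by
      rw [hfd]
      have : (2:Int) ^ 64 = 18446744073709551616 := by norm_num
      omega
    rw [pvWhileTS_eq 64 _ 1 h1 h2]
    simp only [h3, h0, and_self, if_true, ne_eq, not_false_iff]
    have hts : (1 : Int) - 1 + (PySem.Int.bitLength (PySem.Int.floordiv v 3) : Int)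
        = ((PySem.Int.bitLength (PySem.Int.floordiv v 3) : Nat) : Int) := by push_cast; ring
    rw [hts, PySem.List.pyRange_zero_natCast, foldl_mul3]
    simp
  · rw [if_neg hm, if_neg hm]

-- B's conditional accumulation as 'accumulator + conditional term'
lemma add_if (t x : Int) (c : Prop) [Decidable c] :
    (if c then t + x else t) = t + (if c then x else 0) := by
  split_ifs <;> simp

-- one row's contribution (both inner loops run over j = 0,1,2,3)
lemma row_eq (row : List Int) (score : Int)
    (hdom : row.all pvDomInt = true)
    (hlen : 4 ≤ row.length)
    (hpre : ∀ v ∈ row.take 4, PySem.Int.mod v 3 = 0 → v ≠ 0 → 0 < v) :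
    (PySem.List.pyRange 0 4 1).foldl (fun score j =>
      let tempScore : Int := 0
      let tempScore :=
        if PySem.Int.mod (PySem.List.pyGetD row j 0) 3 = 0 ∧ PySem.List.pyGetD row j 0 ≠ 0 then
          let tempScore := tempScore + 1
          let ti := PySem.Int.floordiv (PySem.List.pyGetD row j 0) 3
          let ts := pvWhileTS 64 ti 1
          (PySem.List.pyRange 0 ts 1).foldl (fun t _ => t * 3) tempScore
        else tempScore
      score + tempScore) score
    = (PySem.List.pyRange 0 4 1).foldl (fun total j =>
        let v := PySem.List.pyGetD row j 0
        if PySem.Int.mod v 3 = 0 ∧ v ≠ 0 then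
          total + 3 ^ PySem.Int.bitLength (PySem.Int.floordiv v 3)
        else total) score := by
  match row, hlen with
  | a :: b :: c :: d :: rest, _ =>
    have hr : PySem.List.pyRange 0 4 1 = [0, 1, 2, 3] := by decide
    simp only [List.all_cons, Bool.and_eq_true, pvDomInt, decide_eq_true_eq] at hdom
    have ea := cell_eq a (by tauto) (hpre a (by simp))
    have eb := cell_eq b (by tauto) (hpre b (by simp))
    have ec := cell_eq c (by tauto) (hpre c (by simp))
    have ed := cell_eq d (by tauto) (hpre d (by simp))
    rw [hr]
    simp only [List.foldl]
    have g0 : PySem.List.pyGetD (a :: b :: c :: d :: rest) (0:Int) 0 = a := by simp [pysem]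
    have g1 : PySem.List.pyGetD (a :: b :: c :: d :: rest) (1:Int) 0 = b := by simp [pysem]
    have g2 : PySem.List.pyGetD (a :: b :: c :: d :: rest) (2:Int) 0 = c := by simp [pysem]
    have g3 : PySem.List.pyGetD (a :: b :: c :: d :: rest) (3:Int) 0 = d := by simp [pysem]
    rw [g0, g1, g2, g3]
    rw [add_if, add_if, add_if, add_if]
    rw [ea, eb, ec, ed]

lemma tables_eq (table : List (List Int)) (s : Int)
    (hdom : Dom_fscore table) (hpre : Pre_fscore table) :
    table.foldl (fun score i =>
      (PySem.List.pyRange 0 4 1).foldl (fun score j =>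
        let tempScore : Int := 0
        let tempScore :=
          if PySem.Int.mod (PySem.List.pyGetD i j 0) 3 = 0 ∧ PySem.List.pyGetD i j 0 ≠ 0 then
            let tempScore := tempScore + 1
            let ti := PySem.Int.floordiv (PySem.List.pyGetD i j 0) 3
            let ts := pvWhileTS 64 ti 1
            (PySem.List.pyRange 0 ts 1).foldl (fun t _ => t * 3) tempScore
          else tempScore
        score + tempScore) score) s
    = table.foldl (fun total row =>
        (PySem.List.pyRange 0 4 1).foldl (fun total j =>
          let v := PySem.List.pyGetD row j 0
          if PySem.Int.mod v 3 = 0 ∧ v ≠ 0 then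
            total + 3 ^ PySem.Int.bitLength (PySem.Int.floordiv v 3)
          else total) total) s := by
  induction table generalizing s with
  | nil => rfl
  | cons row rest ih =>
    simp only [Dom_fscore, List.all_cons, Bool.and_eq_true] at hdom
    have hpr := hpre row (by simp)
    have hpre' : Pre_fscore rest := fun r hr => hpre r (by simp [hr])
    rw [List.foldl_cons, List.foldl_cons,
        row_eq row s hdom.1 hpr.1 hpr.2]
    exact ih _ hdom.2 hpre'

-- ===== VERDICT (by name: the statement is the Claim_ definition above) =====
theorem fscore_spec : Claim_equal_fscore := by
  intro table hdom hpre
  unfold Spec_fscore fscore fscore_alt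
  exact tables_eq table 0 hdom hpre
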